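-- pv_equiv track=rewrite | github.com/Sistemas-Inteligentes-2021/Practica_5 | Tests/test_min_max_cutoff.py | count_columns
-- ===== SOURCE A (Python) =====
-- def count_columns(state,sym,num_sym,size):
--     lines=0
--     for n in range(size):
--         sym_state=0
--         blank_space=0
--         i=0
--         while i < size:
--             if(state[(i*size)+n]==sym):
--                 sym_state=sym_state+1
--             elif(state[(i*size)+n]==''):
--                 blank_space=blank_space+1
--             if(num_sym==sym_state and blank_space == size-num_sym):
--                 lines=lines+1
--             i=i+1
--     return lines
-- ===== SOURCE B (Python) =====
-- def count_columns(state, sym, num_sym, size):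
--     if size <= 0:
--         return 0
--     sym_counts = [0] * size
--     blank_counts = [0] * size
--     for idx in range(size * size):
--         cell = state[idx]
--         if cell == sym:
--             sym_counts[idx % size] += 1
--         elif cell == '':
--             blank_counts[idx % size] += 1
--     lines = 0
--     for col in range(size):
--         if sym_counts[col] == num_sym and blank_counts[col] == size - num_sym:
--             lines += 1
--     return lines
-- ===== Notes on version B (the rewrite author's own statement) =====
-- stated objective: alternative
-- what changed: A scans column by column with a nested while loop and an inline test that can only fire on the last row; B makes one flat pass over range(size*size) tallying sym/blank counts per column via idx % size into two arrays, then a second loop compares the tallies. Pre_ excludes the inputs where A raises IndexError (size >= 1 and len(state) < size*size); B raises there too.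
import Mathlib
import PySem

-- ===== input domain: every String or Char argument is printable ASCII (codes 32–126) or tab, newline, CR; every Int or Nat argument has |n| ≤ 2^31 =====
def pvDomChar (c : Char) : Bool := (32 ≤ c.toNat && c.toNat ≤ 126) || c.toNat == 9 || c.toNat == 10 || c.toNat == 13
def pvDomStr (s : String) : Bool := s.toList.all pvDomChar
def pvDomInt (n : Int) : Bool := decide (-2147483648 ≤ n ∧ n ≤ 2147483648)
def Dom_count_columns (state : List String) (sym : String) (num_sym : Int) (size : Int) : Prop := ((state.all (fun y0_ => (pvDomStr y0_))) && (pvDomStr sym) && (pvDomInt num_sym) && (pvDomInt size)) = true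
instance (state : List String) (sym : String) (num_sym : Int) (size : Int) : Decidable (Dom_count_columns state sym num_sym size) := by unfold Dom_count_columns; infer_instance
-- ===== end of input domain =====

-- B replaces A's per-column nested scan (with its fused last-row-only test) by a flat tally pass
-- over all size*size cells into two per-column count arrays followed by a separate verify loop
-- (objective: alternative decomposition, same asymptotic cost).


-- ===== PORT A =====
-- the while loop over rows i (i starts at 0, increments by 1, runs while i < size ⇒ size.toNat iterations)
def countColsInner (state : List String) (sym : String) (num_sym : Int) (size : Int) (n : Int) :
    Nat → Int → Int × Int × Int → Int × Int × Int
  | 0, _, acc => acc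
  | f + 1, i, (s, b, l) =>
    let cell := PySem.List.pyGetD state (i * size + n) ""
    let s' := if cell == sym then s + 1 else s
    let b' := if cell == sym then b else if cell == "" then b + 1 else b
    let l' := if num_sym == s' && b' == size - num_sym then l + 1 else l
    countColsInner state sym num_sym size n f (i + 1) (s', b', l')

def count_columns (state : List String) (sym : String) (num_sym : Int) (size : Int) : Int :=
  (PySem.List.pyRange 0 size 1).foldl
    (fun lines n => (countColsInner state sym num_sym size n size.toNat 0 (0, 0, lines)).2.2) 0

-- ===== PORT B =====
def count_columns_alt (state : List String) (sym : String) (num_sym : Int) (size : Int) : Int :=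
  if size ≤ 0 then 0
  else
    let counts := (PySem.List.pyRange 0 (size * size) 1).foldl
      (fun (p : List Int × List Int) idx =>
        let cell := PySem.List.pyGetD state idx ""
        let col := PySem.Int.mod idx size
        if cell == sym then
          (PySem.List.pySetD p.1 col (PySem.List.pyGetD p.1 col 0 + 1), p.2)
        else if cell == "" then
          (p.1, PySem.List.pySetD p.2 col (PySem.List.pyGetD p.2 col 0 + 1))
        else p)
      (List.replicate size.toNat 0, List.replicate size.toNat 0)
    (PySem.List.pyRange 0 size 1).foldl
      (fun lines col =>
        if PySem.List.pyGetD counts.1 col 0 == num_sym &&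
           PySem.List.pyGetD counts.2 col 0 == size - num_sym
        then lines + 1 else lines) 0

-- ===== PRECONDITION & SPEC =====
-- Pre_ excludes exactly the inputs where the Python A raises IndexError:
-- size ≥ 1 with fewer than size*size cells (B raises IndexError there as well).
def Pre_count_columns (state : List String) (sym : String) (num_sym : Int) (size : Int) : Prop :=
  size ≤ 0 ∨ size * size ≤ (state.length : Int)
instance (state : List String) (sym : String) (num_sym : Int) (size : Int) : Decidable (Pre_count_columns state sym num_sym size) := by unfold Pre_count_columns; infer_instance

def pvWitness_count_columns : List String × String × Int × Int := (["x", "", "", "x"], "x", 1, 2)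

def Spec_count_columns (state : List String) (sym : String) (num_sym : Int) (size : Int) (out : Int) : Prop := out = count_columns_alt state sym num_sym size
instance (state : List String) (sym : String) (num_sym : Int) (size : Int) (out : Int) : Decidable (Spec_count_columns state sym num_sym size out) := by unfold Spec_count_columns; infer_instance

-- ===== CLAIM =====
def Claim_equal_count_columns : Prop := ∀ (state : List String) (sym : String) (num_sym : Int) (size : Int), Dom_count_columns state sym num_sym size → Pre_count_columns state sym num_sym size → Spec_count_columns state sym num_sym size (count_columns state sym num_sym size)

-- ===== LEMMAS AND PROOFS =====

-- the cell read at flat index j (both ports read cells this way; total under Pre_)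
def pvCell (state : List String) (j : Int) : String := PySem.List.pyGetD state j ""

-- number of rows k' < k whose cell in column n satisfies p (A's per-column counters)
def pvColCnt (state : List String) (p : String → Bool) (size n : Int) : Nat → Int
  | 0 => 0
  | k + 1 => pvColCnt state p size n k + (if p (pvCell state ((k : Int) * size + n)) then 1 else 0)

-- number of flat indices m' < m with m' % sz = c whose cell satisfies p (B's tallies)
def pvFlatCnt (state : List String) (p : String → Bool) (sz c : Nat) : Nat → Int
  | 0 => 0
  | m + 1 => pvFlatCnt state p sz c m + (if m % sz = c ∧ p (pvCell state (m : Int)) then 1 else 0)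

lemma pvColCnt_pair_le (state : List String) (sym : String) (size n : Int) (k : Nat) :
    pvColCnt state (fun x => x == sym) size n k +
      pvColCnt state (fun x => !(x == sym) && x == "") size n k ≤ (k : Int) := by
  induction k with
  | zero => simp [pvColCnt]
  | succ k ih =>
    simp only [pvColCnt]
    by_cases h1 : pvCell state ((k : Int) * size + n) == sym <;>
      by_cases h2 : pvCell state ((k : Int) * size + n) == "" <;>
      simp [h1, h2] <;> omega

-- per-step counter update

lemma colcnt_step (state : List String) (sym : String) (size n : Int) (k : Nat) :
  (pvColCnt state (fun x => x == sym) size n (k+1),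
   pvColCnt state (fun x => !(x == sym) && x == "") size n (k+1))
  = (let cell := PySem.List.pyGetD state ((k:Int) * size + n) ""
     ((if cell == sym then pvColCnt state (fun x => x == sym) size n k + 1
       else pvColCnt state (fun x => x == sym) size n k),
      (if cell == sym then pvColCnt state (fun x => !(x == sym) && x == "") size n k
       else if cell == "" then pvColCnt state (fun x => !(x == sym) && x == "") size n k + 1
       else pvColCnt state (fun x => !(x == sym) && x == "") size n k))) := by
  simp only [pvColCnt, pvCell]
  by_cases h1 : PySem.List.pyGetD state ((k:Int) * size + n) "" == sym <;>
    by_cases h2 : PySem.List.pyGetD state ((k:Int) * size + n) "" == "" <;>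
    simp [h1, h2]

lemma inner_spec (state : List String) (sym : String) (num_sym size : Int) (n : Int)
    (sz : Nat) (hs : size = (sz : Int)) :
    ∀ f k l, f + k = sz → 0 < f →
    countColsInner state sym num_sym size n f (k : Int)
      (pvColCnt state (fun x => x == sym) size n k,
       pvColCnt state (fun x => !(x == sym) && x == "") size n k, l)
    = (pvColCnt state (fun x => x == sym) size n sz,
       pvColCnt state (fun x => !(x == sym) && x == "") size n sz,
       l + (if num_sym == pvColCnt state (fun x => x == sym) size n sz &&
              pvColCnt state (fun x => !(x == sym) && x == "") size n sz == size - num_sym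
            then 1 else 0)) := by
  intro f
  induction f with
  | zero => intro k l h hf; omega
  | succ f ih =>
    intro k l h _
    simp only [countColsInner]
    have hstep := colcnt_step state sym size n k
    simp only at hstep
    rw [show ((k:Int) : Int) * size + n = (k:Int) * size + n from rfl]
    -- rewrite the let-bound updates into counters at k+1
    have h1 := congrArg Prod.fst hstep
    have h2 := congrArg Prod.snd hstep
    simp only at h1 h2
    rw [← h1, ← h2]
    cases f with
    | zero =>
      have hk1 : k + 1 = sz := by omega
      simp only [countColsInner]
      rw [← hk1]
      split_ifs <;> simp
    | succ f' =>
      have hk1 : k + 1 < sz := by omega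
      have hnofire : ¬ ((num_sym == pvColCnt state (fun x => x == sym) size n (k+1) &&
            pvColCnt state (fun x => !(x == sym) && x == "") size n (k+1) == size - num_sym) = true) := by
        intro hfire
        simp only [Bool.and_eq_true, beq_iff_eq] at hfire
        have hle := pvColCnt_pair_le state sym size n (k+1)
        omega
      rw [if_neg hnofire]
      have hcast : (k : Int) + 1 = ((k + 1 : Nat) : Int) := by push_cast; ring
      rw [hcast]
      exact ih (k+1) l (by omega) (by omega)

lemma count_columns_eq_fold (state : List String) (sym : String) (num_sym size : Int)
    (sz : Nat) (hs : size = (sz : Int)) (hpos : 0 < sz) :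
    count_columns state sym num_sym size
    = (List.range sz).foldl
        (fun l (c : Nat) =>
          l + (if num_sym == pvColCnt state (fun x => x == sym) size ((c : Nat) : Int) sz &&
                 pvColCnt state (fun x => !(x == sym) && x == "") size ((c : Nat) : Int) sz == size - num_sym
               then 1 else 0)) 0 := by
  unfold count_columns
  rw [hs, PySem.List.pyRange_zero_nat, List.foldl_map]
  apply PySem.List.foldl_congr_mem
  intro lines c _
  have h0 : (0 : Int) = ((0 : Nat) : Int) := rfl
  have := inner_spec state sym num_sym size (c : Int) sz hs sz 0 lines (by omega) hpos
  simp only [pvColCnt, Nat.cast_zero, hs] at this ⊢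
  rw [Int.toNat_natCast]
  rw [this]

lemma set_map_range {β : Type} (f : Nat → β) (n c : Nat) (hc : c < n) (v : β) :
    ((List.range n).map f).set c v = (List.range n).map (fun x => if x = c then v else f x) := by
  apply List.ext_getElem
  · simp
  · intro i h1 h2
    simp only [List.getElem_set, List.getElem_map, List.getElem_range]
    simp only [List.length_set, List.length_map, List.length_range] at h1
    rcases eq_or_ne c i with h | h
    · subst h; simp
    · rw [if_neg h, if_neg (Ne.symm h)]

lemma b_inv (state : List String) (sym : String) (size : Int) (sz : Nat) (hs : size = (sz : Int))
    (hpos : 0 < sz) (M : Nat) :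
    (PySem.List.pyRange 0 (M : Int) 1).foldl
      (fun (p : List Int × List Int) idx =>
        let cell := PySem.List.pyGetD state idx ""
        let col := PySem.Int.mod idx size
        if cell == sym then
          (PySem.List.pySetD p.1 col (PySem.List.pyGetD p.1 col 0 + 1), p.2)
        else if cell == "" then
          (p.1, PySem.List.pySetD p.2 col (PySem.List.pyGetD p.2 col 0 + 1))
        else p)
      (List.replicate sz 0, List.replicate sz 0)
    = ((List.range sz).map (fun c => pvFlatCnt state (fun x => x == sym) sz c M),
       (List.range sz).map (fun c => pvFlatCnt state (fun x => !(x == sym) && x == "") sz c M)) := by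
  induction M with
  | zero =>
    rw [show ((0 : Nat) : Int) = 0 from rfl, PySem.List.pyRange_zero]
    simp only [Int.toNat_zero, List.range_zero, List.map_nil, List.foldl_nil]
    have hmap : ∀ (p : String → Bool),
        (List.range sz).map (fun c => pvFlatCnt state p sz c 0) = List.replicate sz (0 : Int) := by
      intro p
      apply List.ext_getElem <;> simp [pvFlatCnt]
    rw [hmap, hmap]
  | succ M ih =>
    rw [show ((M + 1 : Nat) : Int) = (M : Int) + 1 by push_cast; ring,
        PySem.List.pyRange_one_succ_right (by positivity), List.foldl_append, ih]
    clear ih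
    simp only [List.foldl_cons, List.foldl_nil]
    have hmod : PySem.Int.mod (M : Int) size = ((M % sz : Nat) : Int) := by
      rw [hs]; exact PySem.Int.mod_natCast M sz
    have hlt : M % sz < sz := Nat.mod_lt _ hpos
    by_cases h1 : PySem.List.pyGetD state ((M : Nat) : Int) "" == sym
    · rw [PySem.List.pyGetD_natCast] at h1
      simp only [h1, if_pos, hmod, PySem.List.pyGetD_natCast, PySem.List.pySetD_natCast,
        PySem.List.getD_map_range _ _ _ _ hlt, set_map_range _ _ _ hlt]
      rw [Prod.mk.injEq]
      refine ⟨List.map_congr_left fun c hc => ?_, List.map_congr_left fun c hc => ?_⟩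
      · simp only [pvFlatCnt, pvCell, PySem.List.pyGetD_natCast, h1, and_true]
        rcases eq_or_ne c (M % sz) with h | h
        · subst h; simp
        · rw [if_neg h, if_neg (Ne.symm h), add_zero]
      · simp only [pvFlatCnt, pvCell, PySem.List.pyGetD_natCast, h1]
        simp
    · by_cases h2 : PySem.List.pyGetD state ((M : Nat) : Int) "" == ""
      · rw [PySem.List.pyGetD_natCast] at h1 h2
        simp only [Bool.not_eq_true] at h1
        simp only [h1, h2, if_pos, Bool.false_eq_true, if_false, hmod,
          PySem.List.pyGetD_natCast, PySem.List.pySetD_natCast,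
          PySem.List.getD_map_range _ _ _ _ hlt, set_map_range _ _ _ hlt]
        rw [Prod.mk.injEq]
        refine ⟨List.map_congr_left fun c hc => ?_, List.map_congr_left fun c hc => ?_⟩
        · simp only [pvFlatCnt, pvCell, PySem.List.pyGetD_natCast, h1]
          simp
        · simp only [pvFlatCnt, pvCell, PySem.List.pyGetD_natCast, h1, h2, Bool.not_false, Bool.true_and, and_true]
          rcases eq_or_ne c (M % sz) with h | h
          · subst h; simp
          · rw [if_neg h, if_neg (Ne.symm h), add_zero]
      · rw [PySem.List.pyGetD_natCast] at h1 h2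
        simp only [Bool.not_eq_true] at h1 h2
        simp only [PySem.List.pyGetD_natCast, h1, h2, Bool.false_eq_true, if_false]
        rw [Prod.mk.injEq]
        refine ⟨List.map_congr_left fun c hc => ?_, List.map_congr_left fun c hc => ?_⟩
        · simp only [pvFlatCnt, pvCell, PySem.List.pyGetD_natCast, h1]
          simp
        · simp only [pvFlatCnt, pvCell, PySem.List.pyGetD_natCast, h1, h2]
          simp

lemma flat_block (state : List String) (p : String → Bool) (sz c k : Nat) (hc : c < sz) :
    ∀ j, j ≤ sz →
    pvFlatCnt state p sz c (k * sz + j)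
    = pvFlatCnt state p sz c (k * sz) +
        (if c < j ∧ p (pvCell state ((k * sz + c : Nat) : Int)) then 1 else 0) := by
  intro j
  induction j with
  | zero => simp
  | succ j ih =>
    intro hj
    rw [show k * sz + (j + 1) = (k * sz + j) + 1 from rfl]
    simp only [pvFlatCnt]
    rw [ih (by omega)]
    have hmod : (k * sz + j) % sz = j := by
      rw [Nat.mul_comm, Nat.mul_add_mod, Nat.mod_eq_of_lt (by omega)]
    by_cases hcj : c = j
    · subst hcj
      have : ¬ c < c := lt_irrefl c
      split_ifs <;> simp_all <;> omega
    · split_ifs <;> simp_all <;> omega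

lemma flat_col (state : List String) (p : String → Bool) (size : Int) (sz : Nat)
    (hs : size = (sz : Int)) (c : Nat) (hc : c < sz) :
    ∀ k, k ≤ sz → pvFlatCnt state p sz c (k * sz) = pvColCnt state p size ((c : Nat) : Int) k := by
  intro k
  induction k with
  | zero => simp [pvFlatCnt, pvColCnt]
  | succ k ih =>
    intro hk
    rw [show (k + 1) * sz = k * sz + sz by ring]
    rw [flat_block state p sz c k hc sz le_rfl]
    rw [ih (by omega)]
    simp only [pvColCnt]
    have hcast : ((k * sz + c : Nat) : Int) = (k : Int) * size + (c : Int) := by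
      rw [hs]; push_cast; ring
    rw [hcast]
    split_ifs <;> simp_all <;> omega

lemma alt_eq_fold (state : List String) (sym : String) (num_sym size : Int)
    (sz : Nat) (hs : size = (sz : Int)) (hpos : 0 < sz) :
    count_columns_alt state sym num_sym size
    = (List.range sz).foldl
        (fun l (c : Nat) =>
          if pvColCnt state (fun x => x == sym) size ((c : Nat) : Int) sz == num_sym &&
             pvColCnt state (fun x => !(x == sym) && x == "") size ((c : Nat) : Int) sz == size - num_sym
          then l + 1 else l) 0 := by
  unfold count_columns_alt
  rw [if_neg (by omega)]
  have htn : size.toNat = sz := by rw [hs]; exact Int.toNat_natCast sz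
  have hMM : size * size = ((sz * sz : Nat) : Int) := by rw [hs]; push_cast; ring
  rw [htn, hMM, b_inv state sym size sz hs hpos (sz * sz)]
  rw [hs, PySem.List.pyRange_zero_nat, List.foldl_map]
  apply PySem.List.foldl_congr_mem
  intro lines c hc
  have hc' : c < sz := List.mem_range.mp hc
  simp only [PySem.List.pyGetD_natCast, PySem.List.getD_map_range _ _ _ _ hc']
  rw [flat_col state _ size sz hs c hc' sz le_rfl,
      flat_col state _ size sz hs c hc' sz le_rfl, ← hs]

lemma ports_agree (state : List String) (sym : String) (num_sym size : Int) :
    count_columns state sym num_sym size = count_columns_alt state sym num_sym size := by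
  by_cases hneg : size ≤ 0
  · unfold count_columns count_columns_alt
    rw [PySem.List.pyRange_one_eq_nil hneg, if_pos hneg]
    rfl
  · have hs : size = (size.toNat : Int) := (Int.toNat_of_nonneg (by omega)).symm
    have hpos : 0 < size.toNat := by omega
    rw [count_columns_eq_fold state sym num_sym size size.toNat hs hpos,
        alt_eq_fold state sym num_sym size size.toNat hs hpos]
    apply PySem.List.foldl_congr_mem
    intro acc c _
    have hcomm : (num_sym == pvColCnt state (fun x => x == sym) size ((c : Nat) : Int) size.toNat)
        = (pvColCnt state (fun x => x == sym) size ((c : Nat) : Int) size.toNat == num_sym) := by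
      simp [eq_comm]
    rw [hcomm]
    split_ifs <;> ring

-- ===== VERDICT =====
theorem count_columns_spec : Claim_equal_count_columns := by
  intro state sym num_sym size _ _
  unfold Spec_count_columns
  exact ports_agree state sym num_sym size
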